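-- pv_equiv track=rewrite | github.com/sosomalouf0606-hue/EP2---Maria-Sofia-e-Mariana-Yunes | EP2/funcoes.py | calcula_pontos_sequencia_alta
-- ===== SOURCE A (Python) =====
-- def calcula_pontos_sequencia_alta(dados_rolados):
--     for inicio_sequencia in range (1,3):
--         contador = 0
--         for valor in range (inicio_sequencia, inicio_sequencia + 5):
--             if valor in dados_rolados:
--                 contador += 1
--             if contador == 5:
--                 return 30
--     return 0
-- ===== SOURCE B (Python) =====
-- def calcula_pontos_sequencia_alta(dados_rolados):
--     us = sorted(set(v for v in dados_rolados if 1 <= v <= 6))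
--     run = best = 1 if us else 0
--     for prev, cur in zip(us, us[1:]):
--         run = run + 1 if cur == prev + 1 else 1
--         if run > best:
--             best = run
--     return 30 if best >= 5 else 0
-- ===== Notes on version B (the rewrite author's own statement) =====
-- stated objective: alternative
-- what changed: Instead of testing membership of each candidate straight with nested loops, B sorts the distinct in-range dice once and scans for a run of 5 consecutive values (a run of >=5 among distinct values in 1..6 is exactly a high straight 1-5 or 2-6).
import Mathlib
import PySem

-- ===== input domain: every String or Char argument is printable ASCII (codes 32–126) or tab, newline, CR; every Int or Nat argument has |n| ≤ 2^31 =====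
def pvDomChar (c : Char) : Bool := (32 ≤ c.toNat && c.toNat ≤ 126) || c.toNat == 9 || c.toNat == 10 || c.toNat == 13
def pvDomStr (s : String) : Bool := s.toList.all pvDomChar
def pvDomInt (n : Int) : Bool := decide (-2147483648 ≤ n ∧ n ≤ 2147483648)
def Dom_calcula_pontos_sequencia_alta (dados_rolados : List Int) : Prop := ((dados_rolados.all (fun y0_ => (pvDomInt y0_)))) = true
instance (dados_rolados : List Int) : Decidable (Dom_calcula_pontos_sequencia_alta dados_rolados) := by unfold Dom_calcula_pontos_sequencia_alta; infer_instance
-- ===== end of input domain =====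

-- B sorts the distinct in-range dice and scans once for a run of 5 consecutive values, instead of A's nested membership loops (objective: alternative).

-- ===== PORT A =====
-- inner loop: for valor in range(inicio, inicio+5): count hits; return 30 as soon as contador == 5
def pvLoopA (dados : List Int) (valores : List Int) (contador : Int) : Option Int :=
  match valores with
  | [] => none
  | v :: rest =>
    let contador := if dados.contains v then contador + 1 else contador
    if contador == 5 then some 30 else pvLoopA dados rest contador

-- outer loop: for inicio_sequencia in range(1,3)
def pvOuterA (dados : List Int) (inicios : List Int) : Int :=
  match inicios with
  | [] => 0
  | i :: rest =>
    match pvLoopA dados (PySem.List.pyRange i (i + 5) 1) 0 with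
    | some r => r
    | none => pvOuterA dados rest

def calcula_pontos_sequencia_alta (dados_rolados : List Int) : Int :=
  pvOuterA dados_rolados (PySem.List.pyRange 1 3 1)

-- ===== PORT B =====
-- us = sorted(set(v for v in dados_rolados if 1 <= v <= 6)); then one scan over zip(us, us[1:]) tracking the longest consecutive run
def calcula_pontos_sequencia_alta_alt (dados_rolados : List Int) : Int :=
  let us : List Int :=
    PySem.List.sorted
      (PySem.Set.ofList (dados_rolados.filter (fun v => decide (1 ≤ v) && decide (v ≤ 6))))
      (fun x => x) false
  let init : Int := if us.isEmpty then 0 else 1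
  let rb : Int × Int :=
    (us.zip (PySem.List.slice us (some 1) none)).foldl
      (fun rb pc =>
        let run := if pc.2 = pc.1 + 1 then rb.1 + 1 else 1
        (run, if run > rb.2 then run else rb.2))
      (init, init)
  if rb.2 ≥ 5 then 30 else 0

-- ===== PRECONDITION & SPEC =====
def Spec_calcula_pontos_sequencia_alta (dados_rolados : List Int) (out : Int) : Prop := out = calcula_pontos_sequencia_alta_alt dados_rolados
instance (dados_rolados : List Int) (out : Int) : Decidable (Spec_calcula_pontos_sequencia_alta dados_rolados out) := by unfold Spec_calcula_pontos_sequencia_alta; infer_instance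

-- ===== CLAIM (what is proved, stated in full; the proofs are below) =====
def Claim_equal_calcula_pontos_sequencia_alta : Prop := ∀ (dados_rolados : List Int), Dom_calcula_pontos_sequencia_alta dados_rolados → Spec_calcula_pontos_sequencia_alta dados_rolados (calcula_pontos_sequencia_alta dados_rolados)

-- ===== LEMMAS AND PROOFS =====

-- the sorted distinct in-range dice form exactly the canonical list [1..6] filtered by membership in dados
theorem pv_us_eq (dados : List Int) :
    PySem.List.sorted
      (PySem.Set.ofList (dados.filter (fun v => decide (1 ≤ v) && decide (v ≤ 6))))
      (fun x => x) false
    = ([1, 2, 3, 4, 5, 6] : List Int).filter (fun v => dados.contains v) := by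
  apply PySem.List.sorted_eq_of_perm_of_pairwise_lt
  · rw [List.perm_ext_iff_of_nodup]
    · intro a
      by_cases ha : a ∈ dados <;>
        simp [PySem.Set.mem_ofList, List.mem_filter, List.contains_eq_mem, ha] <;> omega
    · exact List.Nodup.filter _ (by decide)
    · exact PySem.Set.nodup_ofList _
  · exact List.Pairwise.sublist List.filter_sublist (by decide)

theorem pv_main (dados : List Int) :
    calcula_pontos_sequencia_alta dados = calcula_pontos_sequencia_alta_alt dados := by
  have hr13 : PySem.List.pyRange 1 3 1 = [1, 2] := by decide
  have hr1 : PySem.List.pyRange 1 6 1 = [1, 2, 3, 4, 5] := by decide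
  have hr2 : PySem.List.pyRange 2 7 1 = [2, 3, 4, 5, 6] := by decide
  unfold calcula_pontos_sequencia_alta calcula_pontos_sequencia_alta_alt
  rw [pv_us_eq, hr13]
  by_cases h1 : (1 : Int) ∈ dados <;> by_cases h2 : (2 : Int) ∈ dados <;>
    by_cases h3 : (3 : Int) ∈ dados <;> by_cases h4 : (4 : Int) ∈ dados <;>
    by_cases h5 : (5 : Int) ∈ dados <;> by_cases h6 : (6 : Int) ∈ dados <;>
    simp [pvOuterA, pvLoopA, hr1, hr2,
      List.contains_eq_mem, h1, h2, h3, h4, h5, h6, PySem.List.slice_from_one,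
      List.filter, List.zip, List.zipWith, List.foldl]

-- ===== VERDICT (by name: the statement is the Claim_ definition above) =====
theorem calcula_pontos_sequencia_alta_spec : Claim_equal_calcula_pontos_sequencia_alta := by
  intro dados _
  exact pv_main dados
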